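-- pv_equiv track=rewrite | github.com/Harini-04/DSpython | printsingle.py | printsingle
-- ===== SOURCE A (Python) =====
-- def printsingle(A,N):
--     A.sort()
--     for i in range(N):
--         count=0
--         for j in range(N):
--             if(A[i]==A[j]):
--                 count+=1
--         if(count==1):
--             return A[i]
--     return -1
-- ===== SOURCE B (Python) =====
-- def printsingle(A, N):
--     # sorts A in place (like the original), then one linear run-scan over the
--     # first N elements of the sorted list
--     A.sort()
--     prefix = A[:max(N, 0)]
--     while prefix:
--         x = prefix[0]
--         run = 1
--         while run < len(prefix) and prefix[run] == x:
--             run += 1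
--         if run == 1:
--             return x
--         prefix = prefix[run:]
--     return -1
-- ===== Notes on version B (the rewrite author's own statement) =====
-- stated objective: faster
-- what changed: Replaces the quadratic count-every-element-against-every-element loop by a single linear run-length scan over the sorted prefix, returning the first element whose run has length 1.
import Mathlib
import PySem

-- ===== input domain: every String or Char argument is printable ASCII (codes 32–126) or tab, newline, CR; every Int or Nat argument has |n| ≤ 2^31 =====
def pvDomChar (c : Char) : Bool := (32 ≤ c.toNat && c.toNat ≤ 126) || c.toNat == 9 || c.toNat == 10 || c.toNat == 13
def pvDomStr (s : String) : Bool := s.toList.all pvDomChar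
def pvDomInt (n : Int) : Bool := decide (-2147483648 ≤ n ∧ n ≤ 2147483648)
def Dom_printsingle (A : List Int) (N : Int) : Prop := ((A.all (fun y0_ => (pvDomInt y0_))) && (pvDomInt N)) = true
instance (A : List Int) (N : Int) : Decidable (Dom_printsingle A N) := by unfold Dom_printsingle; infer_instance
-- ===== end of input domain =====

-- B replaces A's quadratic count-per-index loop with one linear run-length scan over
-- the sorted prefix (objective: faster, asymptotic).  Both Pythons sort A in place;
-- the equivalence proved here is about the RETURN value.

-- ===== PORT A =====
-- outer 'for i in range(N)' loop with early return
def pvAloop (S : List Int) (N : Int) : List Int → Int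
  | [] => -1
  | i :: rest =>
    let count : Int := (PySem.List.pyRange 0 N 1).foldl
      (fun c j => if PySem.List.pyGetD S j 0 == PySem.List.pyGetD S i 0 then c + 1 else c) 0
    if count = 1 then PySem.List.pyGetD S i 0 else pvAloop S N rest

def printsingle (A : List Int) (N : Int) : Int :=
  let S := PySem.List.sorted A (fun x => x) false
  pvAloop S N (PySem.List.pyRange 0 N 1)

-- ===== PORT B =====
-- the outer 'while prefix' loop; the inner while is the run length of the head
def pvBscan : List Int → Int
  | [] => -1
  | x :: rest =>
    let same := rest.takeWhile (fun y => y == x)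
    if same.length = 0 then x
    else pvBscan (rest.drop same.length)
termination_by l => l.length
decreasing_by simp

def printsingle_alt (A : List Int) (N : Int) : Int :=
  let S := PySem.List.sorted A (fun x => x) false
  pvBscan (PySem.List.slice S none (some (max N 0)))

-- ===== PRECONDITION & SPEC =====
-- Pre_ excludes N > len(A), on which A raises IndexError.
def Pre_printsingle (A : List Int) (N : Int) : Prop := N ≤ (A.length : Int)
instance (A : List Int) (N : Int) : Decidable (Pre_printsingle A N) := by
  unfold Pre_printsingle; infer_instance
def pvWitness_printsingle : List Int × Int := ([3, 1, 2, 1], 4)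

def Spec_printsingle (A : List Int) (N : Int) (out : Int) : Prop := out = printsingle_alt A N
instance (A : List Int) (N : Int) (out : Int) : Decidable (Spec_printsingle A N out) := by
  unfold Spec_printsingle; infer_instance

-- ===== CLAIM (what is proved, stated in full; the proofs are below) =====
def Claim_equal_printsingle : Prop := ∀ (A : List Int) (N : Int), Dom_printsingle A N → Pre_printsingle A N → Spec_printsingle A N (printsingle A N)

-- ===== LEMMAS AND PROOFS =====

-- reference: first element of the scanned list whose count in P is exactly 1
def refFind (P : List Int) : List Int → Int
  | [] => -1
  | x :: rest => if P.count x = 1 then x else refFind P rest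

theorem refFind_skip (P same D : List Int) (h : ∀ y ∈ same, P.count y ≠ 1) :
    refFind P (same ++ D) = refFind P D := by
  induction same with
  | nil => rfl
  | cons y ys ih =>
    simp only [List.cons_append, refFind]
    rw [if_neg (h y (by simp)), ih (fun z hz => h z (by simp [hz]))]

theorem count_loop_eq (S P : List Int) (N : Int) (hN : 0 ≤ N)
    (hP : P = S.take N.toNat) (hlen : N ≤ (S.length : Int)) (x : Int) :
    (PySem.List.pyRange 0 N 1).foldl
      (fun c j => if PySem.List.pyGetD S j 0 == x then c + 1 else c) 0
    = (P.count x : Int) := by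
  have hPlen : P.length = N.toNat := by
    subst hP; simp [List.length_take]; omega
  have hNcast : (PySem.List.len P) = N := by
    simp [PySem.List.len, hPlen]; omega
  rw [PySem.List.foldl_congr_mem _ _
      (fun c j => if PySem.List.pyGetD P j 0 == x then c + 1 else c)]
  · rw [← hNcast]
    refine (PySem.List.foldl_pyRange_pyGetD P 0
      (fun c v => if v == x then c + 1 else c) 0 (le_refl (0:Int))).trans ?_
    simp only [Int.toNat_zero, List.drop_zero]
    rw [PySem.List.foldl_beq_add_one]
    simp
  · intro acc j hj
    rw [PySem.List.mem_pyRange_one] at hj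
    have hj2 : j.toNat < N.toNat := by omega
    rw [PySem.List.pyGetD_eq_getElem S (i := j) 0 hj.1 (by omega),
        PySem.List.pyGetD_eq_getElem P (i := j) 0 hj.1 (by rw [hPlen]; omega)]
    subst hP
    simp [List.getElem_take]

theorem aloop_eq_refFind (S P : List Int) (N : Int) (hN : 0 ≤ N)
    (hP : P = S.take N.toNat) (hlen : N ≤ (S.length : Int))
    (k : Int) (hk : 0 ≤ k) :
    pvAloop S N (PySem.List.pyRange k N 1) = refFind P (P.drop k.toNat) := by
  have hPlen : P.length = N.toNat := by
    subst hP; simp [List.length_take]; omega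
  by_cases hkN : N ≤ k
  · rw [PySem.List.pyRange_one_eq_nil hkN, List.drop_eq_nil_of_le (by omega)]
    rfl
  · rw [Int.not_le] at hkN
    rw [PySem.List.pyRange_one_cons hkN]
    have hkP : k.toNat < P.length := by omega
    have hx : PySem.List.pyGetD S k 0 = P[k.toNat] := by
      rw [PySem.List.pyGetD_eq_getElem S (i := k) 0 hk (by omega)]
      subst hP; simp [List.getElem_take]
    have hdrop : P.drop k.toNat = P[k.toNat] :: P.drop (k.toNat + 1) :=
      (List.getElem_cons_drop hkP).symm
    simp only [pvAloop, hx, count_loop_eq S P N hN hP hlen]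
    rw [hdrop]
    simp only [refFind]
    have hcnt : ((P.count P[k.toNat] : Int) = 1) ↔ P.count P[k.toNat] = 1 := by omega
    have hrec := aloop_eq_refFind S P N hN hP hlen (k + 1) (by omega)
    have hts : (k + 1).toNat = k.toNat + 1 := by omega
    rw [hts] at hrec
    split_ifs with h1 h2 h2
    · rfl
    · exact absurd (hcnt.mp h1) h2
    · exact absurd (hcnt.mpr h2) h1
    · exact hrec
termination_by (N - k).toNat
decreasing_by omega

-- the run scan over a sorted list Q equals the reference scan, provided every
-- element of Q has the same multiplicity in P as in Q
theorem scan_eq_refFind (P : List Int) :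
    ∀ (Q : List Int), Q.Pairwise (· ≤ ·) →
      (∀ z ∈ Q, P.count z = Q.count z) → pvBscan Q = refFind P Q := by
  intro Q hs hc
  match Q with
  | [] => simp [pvBscan, refFind]
  | x :: rest =>
    obtain ⟨same, D, hsame, hD⟩ :
        ∃ same D, rest.takeWhile (fun y => y == x) = same ∧
          rest.dropWhile (fun y => y == x) = D := ⟨_, _, rfl, rfl⟩
    have hsplit : rest = same ++ D := by
      rw [← hsame, ← hD, List.takeWhile_append_dropWhile]
    have hdrop : rest.drop same.length = D := by
      conv_lhs => rw [hsplit]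
      exact List.drop_left
    have hsameeq : ∀ y ∈ same, y = x := by
      intro y hy
      rw [← hsame] at hy
      have := List.mem_takeWhile_imp hy
      simpa using this
    -- no x in D
    have hxD : D.count x = 0 := by
      rw [List.count_eq_zero]
      intro hxmem
      cases D with
      | nil => simp at hxmem
      | cons y tail =>
        have hne : rest.dropWhile (fun z => z == x) ≠ [] := by rw [hD]; simp
        have hy : ¬ y = x := by
          have h := List.head_dropWhile_not (fun z => z == x) hne
          simp only [hD, List.head_cons] at h
          simpa using h
        have hyx : x ≤ y := by
          have hxall : ∀ z ∈ rest, x ≤ z := (List.pairwise_cons.mp hs).1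
          exact hxall y (by rw [hsplit]; simp)
        have hytail : ∀ z ∈ tail, y ≤ z := by
          have hrest : rest.Pairwise (· ≤ ·) := (List.pairwise_cons.mp hs).2
          rw [hsplit] at hrest
          have h2 := (List.pairwise_append.mp hrest).2.1
          exact (List.pairwise_cons.mp h2).1
        rcases List.mem_cons.mp hxmem with h | h
        · exact hy h.symm
        · have := hytail x h; exact hy (le_antisymm (by omega) hyx)
    have hcountQ : (x :: rest).count x = 1 + same.length := by
      rw [hsplit]
      have hsx : same.count x = same.length := by
        rw [List.count_eq_length]; intro y hy; exact ((hsameeq y hy) ▸ rfl)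
      simp [List.count_append, hsx, hxD]
      omega
    -- counts of D's elements agree between Q and D
    have hcD : ∀ z ∈ D, P.count z = D.count z := by
      intro z hz
      have hzx : z ≠ x := by
        intro h; rw [h] at hz
        exact absurd (List.count_pos_iff.mpr hz) (by omega)
      have hkey : (x :: rest).count z = D.count z := by
        have hszero : same.count z = 0 := by
          rw [List.count_eq_zero]; intro hmem
          exact hzx (hsameeq z hmem)
        have hxz : (x == z) = false := by
          simp; exact fun h => hzx h.symm
        rw [hsplit]
        simp [List.count_append, List.count_cons, hszero, hxz]
      rw [← hkey]
      exact hc z (by rw [hsplit]; simp [hz])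
    have hlenD : D.length ≤ rest.length := by
      rw [hsplit]; simp
    show pvBscan (x :: rest) = refFind P (x :: rest)
    rw [pvBscan]
    simp only [hsame]
    by_cases hlen0 : same.length = 0
    · have hsamenil : same = [] := List.length_eq_zero_iff.mp hlen0
      have hcx : P.count x = 1 := by
        rw [hc x (by simp), hcountQ, hsamenil]; simp
      simp only [hlen0, refFind, hcx]
      simp
    · have hcx : P.count x ≠ 1 := by
        rw [hc x (by simp), hcountQ]; omega
      rw [if_neg hlen0, hdrop]
      have hDpair : D.Pairwise (· ≤ ·) := by
        have hrest : rest.Pairwise (· ≤ ·) := (List.pairwise_cons.mp hs).2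
        rw [hsplit] at hrest
        exact (List.pairwise_append.mp hrest).2.1
      rw [scan_eq_refFind P D hDpair hcD]
      conv_rhs => rw [refFind, if_neg hcx, hsplit]
      rw [refFind_skip P same D (fun y hy => (hsameeq y hy) ▸ hcx)]
termination_by Q => Q.length
decreasing_by simp only [List.length_cons]; omega

-- ===== VERDICT (by name: the statement is the Claim_ definition above) =====
theorem printsingle_spec : Claim_equal_printsingle := by
  intro A N _hDom hPre
  unfold Spec_printsingle
  obtain ⟨S, hS⟩ : ∃ S, PySem.List.sorted A (fun x => x) false = S := ⟨_, rfl⟩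
  have hgoal : printsingle A N = pvAloop S N (PySem.List.pyRange 0 N 1) := by
    unfold printsingle; rw [hS]
  have hgoal2 : printsingle_alt A N
      = pvBscan (PySem.List.slice S none (some (max N 0))) := by
    unfold printsingle_alt; rw [hS]
  rw [hgoal, hgoal2]
  have hSlen : S.length = A.length := by
    rw [← hS]; exact PySem.List.length_sorted A (fun x => x) false
  by_cases hN : N ≤ 0
  · rw [PySem.List.pyRange_one_eq_nil hN]
    have hm : max N 0 = 0 := by omega
    rw [hm, PySem.List.slice_to S (by omega)]
    simp [pvAloop, pvBscan]
  · rw [Int.not_le] at hN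
    have hmax : max N 0 = N := by omega
    have hlenS : N ≤ (S.length : Int) := by
      unfold Pre_printsingle at hPre; omega
    rw [hmax, PySem.List.slice_to S (by omega)]
    have hA := aloop_eq_refFind S (S.take N.toNat) N (by omega) rfl hlenS 0 (by omega)
    simp only [Int.toNat_zero, List.drop_zero] at hA
    rw [hA]
    have hPpair : (S.take N.toNat).Pairwise (· ≤ ·) := by
      have hp := PySem.List.sorted_pairwise A (fun x => x)
      rw [hS] at hp
      exact List.Pairwise.sublist (List.take_sublist _ _) hp
    rw [scan_eq_refFind (S.take N.toNat) (S.take N.toNat) hPpair (fun z _ => rfl)]
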